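-- pv_equiv track=rewrite | github.com/vavilovnv/python_ex | Test tasks (unsorted)/Solutions/leetcode/2656-Maximum-sum-with-exactly-k-elements .py | maximizeSum
-- ===== SOURCE A (Python) =====
-- from typing import List
--
-- def maximizeSum(nums: List[int], k: int) -> int:
--     res = 0
--     nums.sort()
--     for _ in range(k):
--         m = nums.pop()
--         nums.append(m + 1)
--         res += m
--     return res
-- ===== SOURCE B (Python) =====
-- def maximizeSum(nums, k):
--     # Closed form: each pick takes the current max and bumps it by 1,
--     # so the picks are max, max+1, ..., max+k-1.
--     # (Unlike A, this does not mutate nums; equivalence is about the return value.)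
--     if k <= 0:
--         return 0
--     return k * max(nums) + k * (k - 1) // 2
-- ===== Notes on version B (the rewrite author's own statement) =====
-- stated objective: faster
-- what changed: Replaced A's sort-then-k-iterations pop/append loop by the closed form k*max(nums) + k*(k-1)//2, valid because the popped element is always the current maximum and is re-inserted incremented by one.
import Mathlib
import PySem

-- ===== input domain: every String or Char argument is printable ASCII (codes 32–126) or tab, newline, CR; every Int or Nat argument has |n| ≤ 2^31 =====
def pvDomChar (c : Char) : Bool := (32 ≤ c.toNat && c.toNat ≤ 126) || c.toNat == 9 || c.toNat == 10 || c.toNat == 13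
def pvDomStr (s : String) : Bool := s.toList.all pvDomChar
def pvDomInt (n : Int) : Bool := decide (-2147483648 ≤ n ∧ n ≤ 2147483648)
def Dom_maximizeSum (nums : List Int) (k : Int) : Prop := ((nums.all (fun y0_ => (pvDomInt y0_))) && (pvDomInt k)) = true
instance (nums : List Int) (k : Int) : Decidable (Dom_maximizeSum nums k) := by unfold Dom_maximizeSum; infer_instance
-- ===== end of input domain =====

-- B replaces A's sort + k pop/append iterations by the closed form k*max + k*(k-1)//2
-- (asymptotically faster); A mutates nums in place (sort/pop/append), B does not —
-- the equivalence proved here is about the return value only.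


-- ===== PORT A =====
-- loop body: m = nums.pop(); nums.append(m + 1); res += m
-- (pop? returns none exactly where Python raises IndexError; excluded by Pre_)
def pvStepA (st : List Int × Int) : List Int × Int :=
  match PySem.List.pop? st.1 with
  | none => st
  | some (m, rest) => (rest ++ [m + 1], st.2 + m)

def maximizeSum (nums : List Int) (k : Int) : Int :=
  ((PySem.List.pyRange 0 k 1).foldl (fun st _ => pvStepA st)
    (PySem.List.sorted nums (fun x => x), (0 : Int))).2

-- ===== PORT B =====
-- (max? returns none exactly where Python's max raises ValueError; excluded by Pre_)
def maximizeSum_alt (nums : List Int) (k : Int) : Int :=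
  if k ≤ 0 then 0
  else
    match PySem.List.max? nums (fun x => x) with
    | none => 0
    | some m => k * m + PySem.Int.floordiv (k * (k - 1)) 2

-- ===== PRECONDITION & SPEC =====
-- A raises IndexError (pop from empty list) iff k ≥ 1 and nums = []; exactly that is excluded.
def Pre_maximizeSum (nums : List Int) (k : Int) : Prop := k ≤ 0 ∨ nums ≠ []
instance (nums : List Int) (k : Int) : Decidable (Pre_maximizeSum nums k) := by
  unfold Pre_maximizeSum; infer_instance
def pvWitness_maximizeSum : List Int × Int := ([3, 1, 2], 4)

def Spec_maximizeSum (nums : List Int) (k : Int) (out : Int) : Prop := out = maximizeSum_alt nums k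
instance (nums : List Int) (k : Int) (out : Int) : Decidable (Spec_maximizeSum nums k out) := by unfold Spec_maximizeSum; infer_instance

-- ===== CLAIM (what is proved, stated in full; the proofs are below) =====
def Claim_equal_maximizeSum : Prop := ∀ (nums : List Int) (k : Int), Dom_maximizeSum nums k → Pre_maximizeSum nums k → Spec_maximizeSum nums k (maximizeSum nums k)

-- ===== LEMMAS AND PROOFS =====

theorem pv_foldl_const {S : Type} (f : S → S) (l : List Int) (init : S) :
    l.foldl (fun s _ => f s) init = f^[l.length] init := by
  induction l generalizing init with
  | nil => rfl
  | cons x t ih => simpa [Function.iterate_succ_apply] using ih (f init)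

theorem pv_iterA (n : Nat) (l : List Int) (x acc : Int)
    (hmax : ∀ y ∈ l, y ≤ x) :
    (pvStepA^[n] (l ++ [x], acc)).2 =
      acc + (n : Int) * x + ∑ i ∈ Finset.range n, (i : Int) := by
  induction n generalizing l x acc with
  | zero => simp
  | succ n ih =>
    rw [Function.iterate_succ_apply]
    have hstep : pvStepA (l ++ [x], acc) = (l ++ [x + 1], acc + x) := by
      simp [pvStepA, PySem.List.pop?_last]
    rw [hstep, ih l (x + 1) (acc + x) (fun y hy => by have := hmax y hy; omega)]
    rw [Finset.sum_range_succ]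
    push_cast
    ring

theorem pv_gauss_mul_two (n : Nat) :
    (∑ i ∈ Finset.range n, (i : Int)) * 2 = (n : Int) * ((n : Int) - 1) := by
  induction n with
  | zero => simp
  | succ m ih => rw [Finset.sum_range_succ]; push_cast; push_cast at ih; linarith

theorem pv_sum_range_gauss (n : Nat) :
    ∑ i ∈ Finset.range n, (i : Int) = PySem.Int.floordiv ((n : Int) * ((n : Int) - 1)) 2 := by
  rw [PySem.Int.floordiv_eq_ediv_of_pos (by norm_num), ← pv_gauss_mul_two n,
    Int.mul_ediv_cancel _ (by norm_num)]

-- the last element of a ≤-sorted nonempty list bounds every element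
theorem pv_last_is_max (s : List Int) (h : s ≠ [])
    (hp : s.Pairwise (· ≤ ·)) : ∀ y ∈ s, y ≤ s.getLast h := by
  intro y hy
  have hd : s.dropLast ++ [s.getLast h] = s := List.dropLast_append_getLast h
  rw [← hd] at hp hy
  rw [List.pairwise_append] at hp
  rcases List.mem_append.mp hy with h1 | h1
  · exact hp.2.2 y h1 _ (List.mem_singleton_self _)
  · simp at h1; omega

-- ===== VERDICT (by name: the statement is the Claim_ definition above) =====
theorem maximizeSum_spec : Claim_equal_maximizeSum := by
  intro nums k _ hpre
  unfold Spec_maximizeSum maximizeSum maximizeSum_alt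
  by_cases hk : k ≤ 0
  · rw [PySem.List.pyRange_one_eq_nil hk]
    simp [hk]
  · have hne : nums ≠ [] := hpre.resolve_left hk
    have hkpos : 0 < k := by omega
    simp only [if_neg hk]
    -- name the sorted list and its last element
    set s := PySem.List.sorted nums (fun x => x) with hs
    have hsne : s ≠ [] := by
      intro h; exact hne ((PySem.List.sorted_eq_nil_iff nums (fun x => x) false).mp h)
    have hsp : s.Pairwise (· ≤ ·) := PySem.List.sorted_pairwise nums (fun x => x)
    set x := s.getLast hsne with hx
    have hmax : ∀ y ∈ s, y ≤ x := pv_last_is_max s hsne hsp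
    -- max? is some, and its value equals x
    obtain ⟨m, hm⟩ : ∃ m, PySem.List.max? nums (fun x => x) = some m := by
      cases hmm : PySem.List.max? nums (fun x => x) with
      | none => exact absurd ((PySem.List.max?_eq_none_iff nums (fun x => x)).mp hmm) hne
      | some m => exact ⟨m, rfl⟩
    have hperm : s.Perm nums := PySem.List.sorted_perm nums (fun x => x) false
    have hmx : m = x := by
      have h1 : x ≤ m := PySem.List.max?_isMax hm x (hperm.mem_iff.mp (List.getLast_mem hsne))
      have h2 : m ≤ x := hmax m (hperm.mem_iff.mpr (PySem.List.max?_mem hm))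
      omega
    rw [hm, hmx]
    -- rewrite the loop as an iterate and use the invariant
    have hlen : (PySem.List.pyRange 0 k 1).length = k.toNat := by
      rw [PySem.List.length_pyRange_one]; omega
    rw [pv_foldl_const pvStepA, hlen]
    have hd : s.dropLast ++ [x] = s := List.dropLast_append_getLast hsne
    have hmax' : ∀ y ∈ s.dropLast, y ≤ x := fun y hy =>
      hmax y (by rw [← hd]; exact List.mem_append_left _ hy)
    rw [show (s, (0:Int)) = (s.dropLast ++ [x], (0:Int)) by rw [hd]]
    rw [pv_iterA k.toNat s.dropLast x 0 hmax', pv_sum_range_gauss]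
    have : ((k.toNat : Int)) = k := by omega
    rw [this]
    ring
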